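-- pv_equiv track=rewrite | github.com/ItsTheSebbe/SequenceDesigner | virtual_scaffold.py | slicing_sequence
-- ===== SOURCE A (Python) =====
-- def slicing_sequence(sequence, cut_template, edge_number):
--
--     sliced_seq = {}
--
--     start = 0
--     position = 1
--
--     for i in cut_template:
--         chunk = sequence[start:start+i]
--         start = start + i
--         sliced_seq['edge ' + str(edge_number+1) + ': segment ' +
--                    str(position) + ' (length = ' + str(i) + ')'] = chunk
--         position = position + 1
--
--     return sliced_seq
-- ===== SOURCE B (Python) =====
-- def slicing_sequence(sequence, cut_template, edge_number):
--     # Build the table of cut boundaries up front, then slice between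
--     # consecutive boundary pairs.
--     bounds = [0]
--     for i in cut_template:
--         bounds.append(bounds[-1] + i)
--
--     sliced_seq = {}
--     for position, (start, end) in enumerate(zip(bounds, bounds[1:]), 1):
--         sliced_seq['edge ' + str(edge_number + 1) + ': segment ' +
--                    str(position) + ' (length = ' + str(end - start) + ')'] = sequence[start:end]
--     return sliced_seq
-- ===== Notes on version B (the rewrite author's own statement) =====
-- stated objective: alternative
-- what changed: A threads a running start offset and position through one accumulator loop; B first builds an explicit table of cumulative cut boundaries, then makes a separate pass over enumerated consecutive boundary pairs, slicing sequence[start:end] and deriving each key's length as end-start.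
import Mathlib
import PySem

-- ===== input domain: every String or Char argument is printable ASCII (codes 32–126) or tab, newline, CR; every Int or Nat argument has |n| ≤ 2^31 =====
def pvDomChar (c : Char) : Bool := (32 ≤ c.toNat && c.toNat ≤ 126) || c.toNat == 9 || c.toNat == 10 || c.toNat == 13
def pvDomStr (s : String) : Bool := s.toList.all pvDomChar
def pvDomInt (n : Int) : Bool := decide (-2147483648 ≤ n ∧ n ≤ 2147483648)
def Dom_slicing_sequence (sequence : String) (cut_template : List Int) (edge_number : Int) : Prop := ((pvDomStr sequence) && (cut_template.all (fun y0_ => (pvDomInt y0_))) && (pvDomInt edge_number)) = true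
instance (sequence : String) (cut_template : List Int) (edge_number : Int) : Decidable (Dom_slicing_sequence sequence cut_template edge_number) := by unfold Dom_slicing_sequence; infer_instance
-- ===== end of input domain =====

-- B replaces A's threaded start/position accumulators by a precomputed boundary
-- table followed by a pass over consecutive boundary pairs (objective: alternative decomposition).


-- ===== PORT A =====
-- one loop step of A: state is (dict, start, position)
def pvAStep (sequence : String) (edge_number : Int)
    (st : PySem.Dict String String × Int × Int) (i : Int) :
    PySem.Dict String String × Int × Int :=
  let chunk := PySem.Str.slice sequence (some st.2.1) (some (st.2.1 + i))
  (st.1.insert ("edge " ++ PySem.Int.toStr (edge_number + 1) ++ ": segment " ++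
      PySem.Int.toStr st.2.2 ++ " (length = " ++ PySem.Int.toStr i ++ ")") chunk,
   st.2.1 + i, st.2.2 + 1)

def slicing_sequence (sequence : String) (cut_template : List Int) (edge_number : Int) : List (String × String) :=
  (cut_template.foldl (pvAStep sequence edge_number)
    (PySem.Dict.empty, 0, 1)).1.items

-- ===== PORT B =====
-- one loop step of B: p = (position, (start, end))
def pvBStep (sequence : String) (edge_number : Int)
    (d : PySem.Dict String String) (p : Int × Int × Int) :
    PySem.Dict String String :=
  d.insert ("edge " ++ PySem.Int.toStr (edge_number + 1) ++ ": segment " ++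
      PySem.Int.toStr p.1 ++ " (length = " ++ PySem.Int.toStr (p.2.2 - p.2.1) ++ ")")
    (PySem.Str.slice sequence (some p.2.1) (some p.2.2))

def slicing_sequence_alt (sequence : String) (cut_template : List Int) (edge_number : Int) : List (String × String) :=
  let bounds := cut_template.foldl (fun bs i => bs ++ [bs.getLast! + i]) [(0 : Int)]
  let pairs := PySem.List.enumerate (bounds.zip (PySem.List.slice bounds (some 1) none)) 1
  (pairs.foldl (pvBStep sequence edge_number)
    (PySem.Dict.empty : PySem.Dict String String)).items

-- ===== PRECONDITION & SPEC =====
def Spec_slicing_sequence (sequence : String) (cut_template : List Int) (edge_number : Int) (out : List (String × String)) : Prop := out = slicing_sequence_alt sequence cut_template edge_number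
instance (sequence : String) (cut_template : List Int) (edge_number : Int) (out : List (String × String)) : Decidable (Spec_slicing_sequence sequence cut_template edge_number out) := by unfold Spec_slicing_sequence; infer_instance

-- ===== CLAIM (what is proved, stated in full; the proofs are below) =====
def Claim_equal_slicing_sequence : Prop := ∀ (sequence : String) (cut_template : List Int) (edge_number : Int), Dom_slicing_sequence sequence cut_template edge_number → Spec_slicing_sequence sequence cut_template edge_number (slicing_sequence sequence cut_template edge_number)

-- ===== LEMMAS AND PROOFS =====

-- the tail of the boundary table, starting after offset s
def pvTB (s : Int) : List Int → List Int
  | [] => []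
  | c :: ct => (s + c) :: pvTB (s + c) ct

lemma pvBoundsFold (ct : List Int) : ∀ (bs : List Int) (s : Int),
    bs.getLast? = some s →
    ct.foldl (fun bs i => bs ++ [bs.getLast! + i]) bs = bs ++ pvTB s ct := by
  induction ct with
  | nil => intro bs s _; simp [pvTB]
  | cons c ct ih =>
    intro bs s hs
    have hne : bs ≠ [] := by rintro rfl; simp at hs
    have hlast : bs.getLast! = s := by
      simp [List.getLast!_eq_getLast?_getD, hs]
    simp only [List.foldl_cons, hlast, pvTB]
    rw [ih (bs ++ [s + c]) (s + c) (by simp)]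
    simp

lemma pvMain (sequence : String) (edge_number : Int) (ct : List Int) :
    ∀ (s pos : Int) (d : PySem.Dict String String),
    (ct.foldl (pvAStep sequence edge_number) (d, s, pos)).1 =
      (PySem.List.enumerate ((s :: pvTB s ct).zip (pvTB s ct)) pos).foldl
        (pvBStep sequence edge_number) d := by
  induction ct with
  | nil => intro s pos d; simp [pvTB]
  | cons c ct ih =>
    intro s pos d
    simp only [pvTB, List.foldl_cons, List.zip_cons_cons, PySem.List.enumerate_cons,
      pvAStep, pvBStep]
    rw [ih (s + c) (pos + 1)]
    simp [add_sub_cancel_left]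

theorem pv_eq (sequence : String) (cut_template : List Int) (edge_number : Int) :
    slicing_sequence sequence cut_template edge_number =
      slicing_sequence_alt sequence cut_template edge_number := by
  simp only [slicing_sequence, slicing_sequence_alt,
    pvBoundsFold cut_template [(0 : Int)] 0 rfl, PySem.List.slice_from_one,
    List.cons_append, List.nil_append, List.tail_cons]
  rw [pvMain]

-- ===== VERDICT (by name: the statement is the Claim_ definition above) =====
theorem slicing_sequence_spec : Claim_equal_slicing_sequence := by
  intro sequence cut_template edge_number _
  exact pv_eq sequence cut_template edge_number
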